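-- pv_equiv track=rewrite | github.com/PRUNERS/FLiT | scripts/flitcli/flitutil.py | remove_license_lines
-- ===== SOURCE A (Python) =====
-- def remove_license_lines(lines):
--     '''
--     Removes the license lines from the iterable of lines.  The license lines
--     section will start with a line containing "-- LICENSE BEGIN --" and will
--     end with a line containing "-- LICENSE END --".  All lines between the two
--     including those two lines will be removed.
--
--     @param lines: the iterable of lines to filter
--     @return lines
--
--     >>> remove_license_lines([
--     ...     '-- something here --',
--     ...     'bla bla bla -- LICENSE BEGIN --',
--     ...     'my name is part of the license!',
--     ...     '# -- LICENSE END -- **/',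
--     ...     'hello',
--     ...     ])
--     ['-- something here --', 'hello']
--
--     >>> remove_license_lines([])
--     []
--
--     >>> remove_license_lines(['-- LICENSE BEGIN --', 'bla bla bla'])
--     []
--
--     >>> remove_license_lines(['bla bla bla', '-- LICENSE END --'])
--     ['bla bla bla', '-- LICENSE END --']
--
--     >>> lines = ['hello', '-- LICENSE BEGIN --', '-- LICENSE END --']
--     >>> remove_license_lines(lines)
--     ['hello']
--     '''
--     BEFORE = 0
--     IN_LICENSE = 1
--     AFTER = 2
--
--     state = BEFORE
--     filtered = []
--     for line in lines:
--         # state transitions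
--         if state == BEFORE and '-- LICENSE BEGIN --' in line:
--             state = IN_LICENSE
--             continue
--         if state == IN_LICENSE and '-- LICENSE END --' in line:
--             state = AFTER
--             continue
--
--         if state != IN_LICENSE:
--             filtered.append(line)
--
--     return filtered
-- ===== SOURCE B (Python) =====
-- def remove_license_lines(lines):
--     '''Boundary-finding rewrite: locate the first BEGIN line and the first
--     END line strictly after it, then rebuild the result from two slices.'''
--     lines = list(lines)
--     i = next((k for k, l in enumerate(lines) if '-- LICENSE BEGIN --' in l), None)
--     if i is None:
--         return lines
--     rest = lines[i + 1:]
--     j = next((k for k, l in enumerate(rest) if '-- LICENSE END --' in l), None)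
--     if j is None:
--         return lines[:i]
--     return lines[:i] + rest[j + 1:]
-- ===== Notes on version B (the rewrite author's own statement) =====
-- stated objective: simpler
-- what changed: Replaces the three-state per-line filter with two boundary searches (first BEGIN line, first END line strictly after it) and slice concatenation.
import Mathlib
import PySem

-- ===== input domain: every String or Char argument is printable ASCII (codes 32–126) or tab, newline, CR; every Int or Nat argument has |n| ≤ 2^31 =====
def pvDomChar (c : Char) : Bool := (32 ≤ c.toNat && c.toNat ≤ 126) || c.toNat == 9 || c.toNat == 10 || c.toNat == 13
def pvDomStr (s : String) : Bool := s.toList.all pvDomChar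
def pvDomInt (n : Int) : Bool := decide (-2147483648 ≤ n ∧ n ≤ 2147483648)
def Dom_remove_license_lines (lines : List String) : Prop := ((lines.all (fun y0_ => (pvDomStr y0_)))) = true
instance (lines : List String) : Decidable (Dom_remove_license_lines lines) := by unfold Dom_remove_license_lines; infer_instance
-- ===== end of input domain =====

-- B replaces A's three-state per-line filter with two boundary searches plus slice concatenation (objective: simpler).
-- ===== PORT A =====
def pvLoopA : List String → Nat → List String → Nat × List String
  | [], state, filtered => (state, filtered)
  | line :: rest, state, filtered =>
    if state = 0 ∧ PySem.Str.isIn "-- LICENSE BEGIN --" line then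
      pvLoopA rest 1 filtered
    else if state = 1 ∧ PySem.Str.isIn "-- LICENSE END --" line then
      pvLoopA rest 2 filtered
    else if state ≠ 1 then
      pvLoopA rest state (filtered ++ [line])
    else
      pvLoopA rest state filtered

def remove_license_lines (lines : List String) : List String :=
  (pvLoopA lines 0 []).2

-- ===== PORT B =====
def remove_license_lines_alt (lines : List String) : List String :=
  match lines.findIdx? (fun l => PySem.Str.isIn "-- LICENSE BEGIN --" l) with
  | none => lines
  | some i =>
    let rest := lines.drop (i + 1)
    match rest.findIdx? (fun l => PySem.Str.isIn "-- LICENSE END --" l) with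
    | none => lines.take i
    | some j => lines.take i ++ rest.drop (j + 1)

-- ===== PRECONDITION & SPEC =====
def Spec_remove_license_lines (lines : List String) (out : List String) : Prop := out = remove_license_lines_alt lines
instance (lines : List String) (out : List String) : Decidable (Spec_remove_license_lines lines out) := by unfold Spec_remove_license_lines; infer_instance

-- ===== CLAIM (what is proved, stated in full; the proofs are below) =====
def Claim_equal_remove_license_lines : Prop := ∀ (lines : List String), Dom_remove_license_lines lines → Spec_remove_license_lines lines (remove_license_lines lines)

-- ===== LEMMAS AND PROOFS =====
-- Generic versions of both programs with the marker tests abstracted out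
-- (keeps simp's Str→Chars bridge lemmas from desynchronising the two sides).
def pvGLoop (pB pE : String → Bool) : List String → Nat → List String → Nat × List String
  | [], state, filtered => (state, filtered)
  | line :: rest, state, filtered =>
    if state = 0 ∧ pB line then pvGLoop pB pE rest 1 filtered
    else if state = 1 ∧ pE line then pvGLoop pB pE rest 2 filtered
    else if state ≠ 1 then pvGLoop pB pE rest state (filtered ++ [line])
    else pvGLoop pB pE rest state filtered

def pvGAlt (pB pE : String → Bool) (lines : List String) : List String :=
  match lines.findIdx? pB with
  | none => lines
  | some i =>
    match (lines.drop (i + 1)).findIdx? pE with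
    | none => lines.take i
    | some j => lines.take i ++ (lines.drop (i + 1)).drop (j + 1)

theorem pvLoopA_eq_gLoop (lines : List String) (st : Nat) (acc : List String) :
    pvLoopA lines st acc =
      pvGLoop (fun l => PySem.Str.isIn "-- LICENSE BEGIN --" l)
        (fun l => PySem.Str.isIn "-- LICENSE END --" l) lines st acc := by
  induction lines generalizing st acc with
  | nil => rfl
  | cons h t ih => simp only [pvLoopA, pvGLoop]; split_ifs <;> apply ih

theorem pvAlt_eq_gAlt (lines : List String) :
    remove_license_lines_alt lines =
      pvGAlt (fun l => PySem.Str.isIn "-- LICENSE BEGIN --" l)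
        (fun l => PySem.Str.isIn "-- LICENSE END --" l) lines := rfl

theorem pvGLoop_acc (pB pE : String → Bool) (lines : List String) (st : Nat) (acc : List String) :
    (pvGLoop pB pE lines st acc).2 = acc ++ (pvGLoop pB pE lines st []).2 := by
  induction lines generalizing st acc with
  | nil => simp [pvGLoop]
  | cons h t ih =>
    simp only [pvGLoop]
    split_ifs
    · exact ih _ _
    · exact ih _ _
    · rw [ih st (acc ++ [h]), ih st ([] ++ [h])]; simp
    · exact ih _ _

theorem pvGLoop_two (pB pE : String → Bool) (lines : List String) :
    (pvGLoop pB pE lines 2 []).2 = lines := by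
  induction lines with
  | nil => rfl
  | cons h t ih => simp [pvGLoop, pvGLoop_acc pB pE t 2 [h], ih]

theorem pvGLoop_one (pB pE : String → Bool) (lines : List String) :
    (pvGLoop pB pE lines 1 []).2 =
      match lines.findIdx? pE with
      | none => []
      | some j => lines.drop (j + 1) := by
  induction lines with
  | nil => rfl
  | cons h t ih =>
    cases he : pE h with
    | true => simp [pvGLoop, he, List.findIdx?_cons, pvGLoop_two]
    | false =>
      simp only [pvGLoop, he, and_false, Bool.false_eq_true, if_false, List.findIdx?_cons,
        if_neg (by simp : ¬ ((1:Nat) = 0 ∧ pB h = true)),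
        if_neg (by simp : ¬ ((1:Nat) ≠ 1))]
      rw [ih]
      cases t.findIdx? pE <;> simp

theorem pvGLoop_zero (pB pE : String → Bool) (lines : List String) :
    (pvGLoop pB pE lines 0 []).2 = pvGAlt pB pE lines := by
  induction lines with
  | nil => rfl
  | cons h t ih =>
    cases hb : pB h with
    | true =>
      simp only [pvGLoop, hb, and_true, pvGAlt, List.findIdx?_cons,
        if_true]
      rw [pvGLoop_one pB pE t]
      cases hf : t.findIdx? pE <;> simp [hf]
    | false =>
      simp only [pvGLoop, hb, and_false, Bool.false_eq_true, if_false,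
        if_pos (by simp : (0:Nat) ≠ 1), if_neg (by simp : ¬ ((0:Nat) = 1 ∧ pE h = true)),
        List.nil_append, pvGAlt, List.findIdx?_cons]
      rw [pvGLoop_acc pB pE t 0 [h], ih]
      cases hf : t.findIdx? pB with
      | none => simp [pvGAlt, hf]
      | some i =>
        simp only [pvGAlt, hf, Option.map_some]
        cases hg : (t.drop (i + 1)).findIdx? pE with
        | none => simp [hg]
        | some j => simp [hg, show i + 1 + (j + 1) = j + 1 + (i + 1) by omega, List.drop_drop]

-- ===== VERDICT (by name: the statement is the Claim_ definition above) =====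
theorem remove_license_lines_spec : Claim_equal_remove_license_lines := by
  intro lines _
  unfold Spec_remove_license_lines remove_license_lines
  rw [pvLoopA_eq_gLoop, pvAlt_eq_gAlt]
  exact pvGLoop_zero _ _ lines
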